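-- pv_equiv track=rewrite | github.com/uwa-iss/public-uwactf-challenges-2022 | misc/Knight-moves/solution/solution.py | backtrace
-- ===== SOURCE A (Python) =====
-- row_map = {
--         0: "8",
--         1: "7",
--         2: "6",
--         3: "5",
--         4: "4",
--         5: "3",
--         6: "2",
--         7: "1",
-- }
--
-- col_map = {
--         0: "a",
--         1: "b",
--         2: "c",
--         3: "d",
--         4: "e",
--         5: "f",
--         6: "g",
--         7: "h",
-- }
--
-- def map_position(path):
--     sol = ""
--     for move in path:
--         sol += ( col_map[move[1]] + row_map[move[0]] + " " )
--     return sol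
--
-- def backtrace(parent, knight_pos, king_pos):
--     path = [king_pos]
--
--     # Backtrack from king position to knight position
--     while path[-1] != knight_pos:
--         parent_pos = parent[path[-1]]
--         path.append(parent_pos)
--
--     path.reverse()
--     path = map_position(path)
--
--     return path
-- ===== SOURCE B (Python) =====
-- def backtrace(parent, knight_pos, king_pos):
--     # Recursive formulation: the call stack replaces A's path list + reverse +
--     # separate map pass; squares are emitted knight-first directly, and the
--     # algebraic name is computed arithmetically instead of via lookup tables.
--     def go(pos):
--         name = chr(97 + pos[1]) + str(8 - pos[0]) + " "
--         if pos == knight_pos: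
--             return name
--         return go(parent[pos]) + name
--     return go(king_pos)
-- ===== Notes on version B (the rewrite author's own statement) =====
-- stated objective: simpler
-- what changed: B replaces A's three staged passes (append positions to a list while walking, reverse the list, then a separate map-and-concatenate pass over it) by a single head-recursive function: the call stack yields the squares knight-first directly, with no list, no reverse and no string accumulator, and the algebraic name is computed arithmetically (chr/str) instead of via the two lookup dicts.
import Mathlib
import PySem

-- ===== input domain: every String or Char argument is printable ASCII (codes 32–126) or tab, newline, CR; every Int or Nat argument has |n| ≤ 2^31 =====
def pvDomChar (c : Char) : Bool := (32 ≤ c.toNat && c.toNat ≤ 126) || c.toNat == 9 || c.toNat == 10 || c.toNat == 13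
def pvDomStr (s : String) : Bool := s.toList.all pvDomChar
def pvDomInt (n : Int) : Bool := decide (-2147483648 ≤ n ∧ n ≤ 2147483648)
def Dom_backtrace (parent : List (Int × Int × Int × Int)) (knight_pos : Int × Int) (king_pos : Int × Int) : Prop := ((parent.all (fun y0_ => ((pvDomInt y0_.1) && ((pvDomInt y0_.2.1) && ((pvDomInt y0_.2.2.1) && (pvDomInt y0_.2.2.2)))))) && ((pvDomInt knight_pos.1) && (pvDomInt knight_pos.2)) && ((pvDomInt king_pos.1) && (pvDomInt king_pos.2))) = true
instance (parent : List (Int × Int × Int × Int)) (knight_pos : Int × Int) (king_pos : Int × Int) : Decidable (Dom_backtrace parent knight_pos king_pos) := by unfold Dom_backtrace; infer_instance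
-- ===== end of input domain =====

-- B replaces A's three staged passes (build a path list, reverse it, map it to a string) by one
-- head-recursive function: the call stack yields the squares knight-first, the name is arithmetic.

-- shared argument decoding: the Python `parent` is a dict keyed by (int,int) pairs
def pvToDict (parent : List (Int × Int × Int × Int)) : PySem.Dict (Int × Int) (Int × Int) :=
  PySem.Dict.ofList (parent.map (fun e => ((e.1, e.2.1), (e.2.2.1, e.2.2.2))))

-- ===== PORT A =====
def rowMap : PySem.Dict Int String :=
  PySem.Dict.ofList [(0, "8"), (1, "7"), (2, "6"), (3, "5"), (4, "4"), (5, "3"), (6, "2"), (7, "1")]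

def colMap : PySem.Dict Int String :=
  PySem.Dict.ofList [(0, "a"), (1, "b"), (2, "c"), (3, "d"), (4, "e"), (5, "f"), (6, "g"), (7, "h")]

def mapPosition (path : List (Int × Int)) : String :=
  path.foldl (fun sol move => sol ++ (colMap.getD move.2 "" ++ rowMap.getD move.1 "" ++ " ")) ""

-- the while loop; fuel parent.length + 1 is exact: a terminating Python walk never revisits a key
def loopA (d : PySem.Dict (Int × Int) (Int × Int)) (knight : Int × Int) :
    Nat → List (Int × Int) → List (Int × Int)
  | 0, path => path
  | f + 1, path =>
    match PySem.List.pyGet? path (-1) with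
    | none => path
    | some last =>
      if last ≠ knight then
        match d.get? last with
        | none => path   -- Python raises KeyError here; excluded by Pre_
        | some p => loopA d knight f (path ++ [p])
      else path

def backtrace (parent : List (Int × Int × Int × Int)) (knight_pos : Int × Int) (king_pos : Int × Int) : String :=
  mapPosition ((loopA (pvToDict parent) knight_pos (parent.length + 1) [king_pos]).reverse)

-- ===== PORT B =====
def fmtB (pos : Int × Int) : String :=
  String.singleton (Char.ofNat (97 + pos.2).toNat) ++ PySem.Int.toStr (8 - pos.1) ++ " "

-- the recursive `go`; same fuel bound as A's loop (a terminating walk never revisits a key)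
def goB (d : PySem.Dict (Int × Int) (Int × Int)) (knight : Int × Int) :
    Nat → (Int × Int) → String
  | 0, cur => fmtB cur
  | f + 1, cur =>
    if cur = knight then fmtB cur
    else
      match d.get? cur with
      | none => fmtB cur   -- Python raises KeyError here; excluded by Pre_
      | some p => goB d knight f p ++ fmtB cur

def backtrace_alt (parent : List (Int × Int × Int × Int)) (knight_pos : Int × Int) (king_pos : Int × Int) : String :=
  goB (pvToDict parent) knight_pos (parent.length + 1) king_pos

-- ===== PRECONDITION & SPEC =====
def sqOk (p : Int × Int) : Bool :=
  decide (0 ≤ p.1) && decide (p.1 ≤ 7) && decide (0 ≤ p.2) && decide (p.2 ≤ 7)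

-- the parent chain starting at cur reaches knight within the given number of steps,
-- every square on it lying on the 8×8 board
def chainOk (d : PySem.Dict (Int × Int) (Int × Int)) (knight : Int × Int) :
    Nat → (Int × Int) → Bool
  | 0, _ => false
  | f + 1, cur =>
    sqOk cur &&
      (cur == knight ||
        (match d.get? cur with
         | none => false
         | some p => chainOk d knight f p))

-- Pre_ excludes exactly the inputs where A raises KeyError (a missing parent pointer, or a square
-- off the 8×8 board) or loops forever (a parent cycle): A returns iff the chain from king_pos
-- reaches knight_pos — necessarily within |parent| lookups, since a terminating walk never
-- revisits a key — with every visited square on the board.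
def Pre_backtrace (parent : List (Int × Int × Int × Int)) (knight_pos : Int × Int) (king_pos : Int × Int) : Prop :=
  chainOk (pvToDict parent) knight_pos (parent.length + 1) king_pos = true
instance (parent : List (Int × Int × Int × Int)) (knight_pos : Int × Int) (king_pos : Int × Int) : Decidable (Pre_backtrace parent knight_pos king_pos) := by unfold Pre_backtrace; infer_instance

def pvWitness_backtrace : (List (Int × Int × Int × Int)) × (Int × Int) × (Int × Int) :=
  ([(0, 0, 1, 2), (1, 2, 3, 3)], (3, 3), (0, 0))

def Spec_backtrace (parent : List (Int × Int × Int × Int)) (knight_pos : Int × Int) (king_pos : Int × Int) (out : String) : Prop := out = backtrace_alt parent knight_pos king_pos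
instance (parent : List (Int × Int × Int × Int)) (knight_pos : Int × Int) (king_pos : Int × Int) (out : String) : Decidable (Spec_backtrace parent knight_pos king_pos out) := by unfold Spec_backtrace; infer_instance

-- ===== CLAIM (what is proved, stated in full; the proofs are below) =====
def Claim_equal_backtrace : Prop := ∀ (parent : List (Int × Int × Int × Int)) (knight_pos : Int × Int) (king_pos : Int × Int), Dom_backtrace parent knight_pos king_pos → Pre_backtrace parent knight_pos king_pos → Spec_backtrace parent knight_pos king_pos (backtrace parent knight_pos king_pos)

-- ===== LEMMAS AND PROOFS =====

-- the chain of squares from cur to knight (well-formed only under chainOk)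
def wchain (d : PySem.Dict (Int × Int) (Int × Int)) (knight : Int × Int) :
    Nat → (Int × Int) → List (Int × Int)
  | 0, _ => []
  | f + 1, cur =>
    if cur = knight then [cur]
    else
      match d.get? cur with
      | none => [cur]
      | some p => cur :: wchain d knight f p

def joinF (fmt : Int × Int → String) : List (Int × Int) → String
  | [] => ""
  | m :: r => fmt m ++ joinF fmt r

def fmtA (move : Int × Int) : String :=
  colMap.getD move.2 "" ++ rowMap.getD move.1 "" ++ " "

lemma joinF_append (fmt : Int × Int → String) (a b : List (Int × Int)) :
    joinF fmt (a ++ b) = joinF fmt a ++ joinF fmt b := by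
  induction a with
  | nil => simp [joinF]
  | cons x t ih => simp [joinF, ih, String.append_assoc]

lemma joinF_congr (f g : Int × Int → String) (l : List (Int × Int))
    (h : ∀ x ∈ l, f x = g x) : joinF f l = joinF g l := by
  induction l with
  | nil => rfl
  | cons x t ih =>
    simp only [joinF, h x (by simp)]
    rw [ih (fun y hy => h y (by simp [hy]))]

lemma fmt_eq (p : Int × Int) (h : sqOk p = true) : fmtA p = fmtB p := by
  obtain ⟨r, c⟩ := p
  simp only [sqOk, Bool.and_eq_true, decide_eq_true_eq] at h
  obtain ⟨⟨⟨h1, h2⟩, h3⟩, h4⟩ := h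
  interval_cases r <;> interval_cases c <;> decide

lemma mapPosition_eq_joinF (l : List (Int × Int)) : mapPosition l = joinF fmtA l := by
  have key : ∀ (l : List (Int × Int)) (s : String),
      l.foldl (fun sol move => sol ++ (colMap.getD move.2 "" ++ rowMap.getD move.1 "" ++ " ")) s
        = s ++ joinF fmtA l := by
    intro l
    induction l with
    | nil => intro s; simp [joinF]
    | cons x t ih =>
      intro s
      rw [List.foldl_cons, ih]
      simp [joinF, fmtA, String.append_assoc]
  simpa using key l ""

lemma chainOk_sq (d : PySem.Dict (Int × Int) (Int × Int)) (knight : Int × Int) :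
    ∀ (f : Nat) (cur : Int × Int), chainOk d knight f cur = true →
      ∀ x ∈ wchain d knight f cur, sqOk x = true := by
  intro f
  induction f with
  | zero => intro cur h; simp [chainOk] at h
  | succ f ih =>
    intro cur h x hx
    simp only [chainOk, Bool.and_eq_true, Bool.or_eq_true, beq_iff_eq] at h
    obtain ⟨hsq, hrest⟩ := h
    simp only [wchain] at hx
    split at hx
    · simp at hx; subst hx; exact hsq
    · rename_i hne
      have hm : (match d.get? cur with | none => false | some p => chainOk d knight f p) = true := by
        rcases hrest with hk | hm
        · exact absurd hk hne
        · exact hm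
      cases hg : d.get? cur with
      | none => simp [hg] at hm
      | some p =>
        simp only [hg] at hx hm
        rcases List.mem_cons.mp hx with rfl | hx
        · exact hsq
        · exact ih p hm x hx

lemma chainOk_step (d : PySem.Dict (Int × Int) (Int × Int)) (knight : Int × Int)
    (f : Nat) (cur : Int × Int) (h : chainOk d knight (f + 1) cur = true)
    (hne : cur ≠ knight) :
    ∃ p, d.get? cur = some p ∧ chainOk d knight f p = true := by
  simp only [chainOk, Bool.and_eq_true, Bool.or_eq_true, beq_iff_eq] at h
  obtain ⟨-, hrest⟩ := h
  rcases hrest with hk | hm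
  · exact absurd hk hne
  · cases hg : d.get? cur with
    | none => simp [hg] at hm
    | some p => simp only [hg] at hm; exact ⟨p, rfl, hm⟩

lemma loopA_eq (d : PySem.Dict (Int × Int) (Int × Int)) (knight : Int × Int) :
    ∀ (f : Nat) (cur : Int × Int), chainOk d knight f cur = true →
      ∀ acc, loopA d knight f (acc ++ [cur]) = acc ++ wchain d knight f cur := by
  intro f
  induction f with
  | zero => intro cur h; simp [chainOk] at h
  | succ f ih =>
    intro cur h acc
    simp only [loopA, PySem.List.pyGet?_neg_one_append_singleton]
    by_cases hk : cur = knight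
    · subst hk; simp [wchain]
    · simp only [if_pos (by exact hk : cur ≠ knight)]
      obtain ⟨p, hg, hc⟩ := chainOk_step d knight f cur h hk
      simp only [hg, wchain, if_neg hk]
      have h2 := ih p hc (acc ++ [cur])
      simp only [List.append_assoc, List.cons_append, List.nil_append] at h2 ⊢
      exact h2

lemma goB_eq (d : PySem.Dict (Int × Int) (Int × Int)) (knight : Int × Int) :
    ∀ (f : Nat) (cur : Int × Int), chainOk d knight f cur = true →
      goB d knight f cur = joinF fmtB (wchain d knight f cur).reverse := by
  intro f
  induction f with
  | zero => intro cur h; simp [chainOk] at h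
  | succ f ih =>
    intro cur h
    simp only [goB]
    by_cases hk : cur = knight
    · simp [hk, wchain, joinF]
    · simp only [if_neg hk]
      obtain ⟨p, hg, hc⟩ := chainOk_step d knight f cur h hk
      simp only [hg, wchain, if_neg hk, List.reverse_cons, joinF_append, joinF]
      rw [ih p hc]
      simp

-- ===== VERDICT (by name: the statement is the Claim_ definition above) =====
theorem backtrace_spec : Claim_equal_backtrace := by
  intro parent knight king _ hpre
  unfold Spec_backtrace backtrace backtrace_alt
  unfold Pre_backtrace at hpre
  set d := pvToDict parent with hd
  set f := parent.length + 1 with hf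
  have hA : loopA d knight f [king] = wchain d knight f king := by
    have := loopA_eq d knight f king hpre []
    simpa using this
  rw [hA, mapPosition_eq_joinF, goB_eq d knight f king hpre]
  have hsq := chainOk_sq d knight f king hpre
  exact joinF_congr _ _ _ (fun x hx => fmt_eq x (hsq x (by simpa using hx)))
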